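-- pv_equiv track=rewrite | github.com/tikhonovpavel/reasoning-probing | analyze_full_early_stopping_strategy.py | simulate_unified_heuristic
-- ===== SOURCE A (Python) =====
-- from typing import Optional, List, Tuple
--
-- def simulate_unified_heuristic(
--     predictions: List[Optional[str]],
--     cooldown_window: int
-- ) -> Optional[Tuple[int, str]]:
--     """
--     Simulates a unified early stopping heuristic for ALL traces.
--     Returns (stop_index, predicted_letter) if a rule triggers.
--     The type of rule is determined by the caller based on num_changes.
--     Nulls do not increment the streak, but do not reset it either.
--     """
--     if not predictions:
--         return None
--
--     last_pred = None
--     streak = 0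
--
--     for i, pred in enumerate(predictions):
--         if not pred or pred not in "ABCD":
--             # On null, we do nothing to the streak. It's a pause.
--             continue
--
--         if last_pred is None:
--             # First valid prediction
--             last_pred = pred
--             streak = 1
--         elif pred == last_pred:
--             streak += 1
--         else:
--             # A change occurred
--             last_pred = pred
--             streak = 1
--
--         if streak >= cooldown_window:
--             return i, last_pred
--
--     return None
-- ===== SOURCE B (Python) =====
-- from itertools import groupby
-- from typing import Optional, List, Tuple
--
--
-- def simulate_unified_heuristic(
--     predictions: List[Optional[str]],
--     cooldown_window: int
-- ) -> Optional[Tuple[int, str]]: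
--     # Keep only valid entries (truthy and a substring of "ABCD"), then scan
--     # maximal runs of equal consecutive letters; the first run long enough
--     # yields its element at position need-1.
--     valid = [(i, p) for i, p in enumerate(predictions) if p and p in "ABCD"]
--     need = max(cooldown_window, 1)
--     for letter, grp in groupby(valid, key=lambda t: t[1]):
--         run = list(grp)
--         if len(run) >= need:
--             return run[need - 1][0], letter
--     return None
-- ===== Notes on version B (the rewrite author's own statement) =====
-- stated objective: alternative
-- what changed: Replaces A's single stateful scan with last_pred/streak accumulators by a filter-then-group decomposition: build the list of valid (index, letter) entries once, group them with itertools.groupby into maximal runs of equal consecutive letters, and return the element at position max(cooldown_window,1)-1 of the first run that is long enough.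
import Mathlib
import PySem

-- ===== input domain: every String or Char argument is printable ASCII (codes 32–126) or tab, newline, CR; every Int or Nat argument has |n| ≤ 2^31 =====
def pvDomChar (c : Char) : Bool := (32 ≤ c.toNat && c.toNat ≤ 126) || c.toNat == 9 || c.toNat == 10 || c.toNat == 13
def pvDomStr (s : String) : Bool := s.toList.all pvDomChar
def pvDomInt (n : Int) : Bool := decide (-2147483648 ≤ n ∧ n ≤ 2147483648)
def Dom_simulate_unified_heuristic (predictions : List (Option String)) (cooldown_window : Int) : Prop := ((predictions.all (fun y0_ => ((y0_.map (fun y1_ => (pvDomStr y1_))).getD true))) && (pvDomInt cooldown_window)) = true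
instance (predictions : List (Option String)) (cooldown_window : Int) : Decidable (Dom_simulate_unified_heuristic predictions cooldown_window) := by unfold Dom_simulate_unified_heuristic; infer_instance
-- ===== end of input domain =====

-- B replaces A's streak/last-pred accumulator loop by a different decomposition: filter the
-- valid entries once, group them into maximal runs of equal consecutive letters (groupby),
-- and index into the first long-enough run (objective: alternative; same asymptotic cost).

-- ===== PORT A =====
-- the for-loop with state (last_pred, streak); early return = returning some
def pvALoop (cooldown_window : Int) : List (Int × Option String) → Option String → Int → Option (Int × String)
  | [], _, _ => none
  | (i, pred) :: rest, last_pred, streak =>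
    -- "if not pred or pred not in 'ABCD': continue"  (None and "" are falsy; substring test)
    if pred.getD "" == "" || !(PySem.Str.isIn (pred.getD "") "ABCD") then
      pvALoop cooldown_window rest last_pred streak
    else
      let p := pred.getD ""
      let st : String × Int :=
        match last_pred with
        | none => (p, 1)
        | some lp => if p == lp then (lp, streak + 1) else (p, 1)
      if cooldown_window ≤ st.2 then some (i, st.1)
      else pvALoop cooldown_window rest (some st.1) st.2

def simulate_unified_heuristic (predictions : List (Option String)) (cooldown_window : Int) : Option (Int × String) :=
  if predictions = [] then none
  else pvALoop cooldown_window (PySem.List.enumerate predictions 0) none 0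

-- ===== PORT B =====
-- "[(i, p) for i, p in enumerate(predictions) if p and p in 'ABCD']" (one comprehension entry)
def pvValidEntry : Int × Option String → Option (Int × String)
  | (i, some p) => if !(p == "") && PySem.Str.isIn p "ABCD" then some (i, p) else none
  | (_, none) => none

-- itertools.groupby keyed on the letter: maximal runs of equal consecutive letters
def pvRuns : List (Int × String) → List (List (Int × String))
  | [] => []
  | x :: xs =>
    (x :: xs.takeWhile (fun y => y.2 == x.2)) :: pvRuns (xs.dropWhile (fun y => y.2 == x.2))
termination_by l => l.length
decreasing_by
  simp only [List.length_cons]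
  exact Nat.lt_succ_of_le (List.length_dropWhile_le _ _)

-- "for letter, grp in groupby(...): run = list(grp); if len(run) >= need: return run[need-1][0], letter"
def pvFindRun (need : Nat) : List (List (Int × String)) → Option (Int × String)
  | [] => none
  | run :: rs => if need ≤ run.length then run[need - 1]? else pvFindRun need rs

def simulate_unified_heuristic_alt (predictions : List (Option String)) (cooldown_window : Int) : Option (Int × String) :=
  pvFindRun (max cooldown_window 1).toNat
    (pvRuns ((PySem.List.enumerate predictions 0).filterMap pvValidEntry))

-- ===== PRECONDITION & SPEC =====
def Spec_simulate_unified_heuristic (predictions : List (Option String)) (cooldown_window : Int) (out : Option (Int × String)) : Prop := out = simulate_unified_heuristic_alt predictions cooldown_window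
instance (predictions : List (Option String)) (cooldown_window : Int) (out : Option (Int × String)) : Decidable (Spec_simulate_unified_heuristic predictions cooldown_window out) := by unfold Spec_simulate_unified_heuristic; infer_instance

-- ===== CLAIM (what is proved, stated in full; the proofs are below) =====
def Claim_equal_simulate_unified_heuristic : Prop := ∀ (predictions : List (Option String)) (cooldown_window : Int), Dom_simulate_unified_heuristic predictions cooldown_window → Spec_simulate_unified_heuristic predictions cooldown_window (simulate_unified_heuristic predictions cooldown_window)

-- ===== LEMMAS AND PROOFS =====

-- A's loop restricted to the valid entries (proof-only helper)
def pvVLoop (cw : Int) : List (Int × String) → Option String → Int → Option (Int × String)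
  | [], _, _ => none
  | (i, p) :: rest, last_pred, streak =>
    let st : String × Int :=
      match last_pred with
      | none => (p, 1)
      | some lp => if p == lp then (lp, streak + 1) else (p, 1)
    if cw ≤ st.2 then some (i, st.1) else pvVLoop cw rest (some st.1) st.2

-- skipping invalid entries = looping over the filtered list
lemma pvALoop_eq_vloop (cw : Int) (l : List (Int × Option String)) :
    ∀ last streak, pvALoop cw l last streak = pvVLoop cw (l.filterMap pvValidEntry) last streak := by
  induction l with
  | nil => intro last streak; simp [pvALoop, pvVLoop]
  | cons x rest ih =>
    obtain ⟨i, pred⟩ := x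
    intro last streak
    match pred with
    | none => simpa [pvALoop, pvValidEntry] using ih last streak
    | some p =>
      by_cases hpe : p = ""
      · subst hpe; simpa [pvALoop, pvValidEntry] using ih last streak
      · cases hin : PySem.Chars.isIn p.toList ['A', 'B', 'C', 'D'] with
        | false => simpa [pvALoop, pvValidEntry, hpe, hin] using ih last streak
        | true => simp [pvALoop, pvVLoop, pvValidEntry, hpe, hin, ih]

-- after a change of letter the carried state is irrelevant (cw ≥ 2 so the reset never fires at once)
lemma pvVLoop_reset (cw : Int) (hcw : 2 ≤ cw) (q : Int × String) (ds : List (Int × String))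
    (p : String) (hq : (q.2 == p) = false) (m : Int) :
    pvVLoop cw (q :: ds) (some p) m = pvVLoop cw (q :: ds) none 0 := by
  obtain ⟨qi, qp⟩ := q
  simp only at hq
  simp [pvVLoop, hq, show ¬ cw ≤ 1 by omega]

-- the loop on a constant run t (all letters = p) followed by d, entered with streak s+1 < cw
lemma pvVLoop_run (cw : Int) (hcw : 2 ≤ cw) :
    ∀ (t : List (Int × String)) (s : Nat) (d : List (Int × String)) (p : String),
    (∀ y ∈ t, y.2 = p) → ((s : Int) + 1 < cw) →
    pvVLoop cw (t ++ d) (some p) ((s : Int) + 1) =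
      if cw.toNat ≤ s + 1 + t.length then t[cw.toNat - s - 2]?
      else pvVLoop cw d (some p) ((s : Int) + 1 + t.length) := by
  intro t
  induction t with
  | nil =>
    intro s d p _ hs
    simp only [List.length_nil, List.nil_append]
    rw [if_neg (by omega)]
    simp
  | cons y t' ih =>
    intro s d p hall hs
    obtain ⟨yi, yp⟩ := y
    have hyp : yp = p := hall (yi, yp) (List.mem_cons_self ..)
    subst hyp
    rw [List.cons_append,
        show pvVLoop cw ((yi, yp) :: (t' ++ d)) (some yp) ((s : Int) + 1)
            = if cw ≤ (s : Int) + 1 + 1 then some (yi, yp)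
              else pvVLoop cw (t' ++ d) (some yp) ((s : Int) + 1 + 1) from by
          simp [pvVLoop]]
    by_cases hc : cw ≤ (s : Int) + 1 + 1
    · rw [if_pos hc]
      rw [if_pos (by simp only [List.length_cons]; omega)]
      have hk : cw.toNat - s - 2 = 0 := by omega
      rw [hk]
      simp
    · rw [if_neg hc]
      have harg : (s : Int) + 1 + 1 = ((s + 1 : Nat) : Int) + 1 := by push_cast; ring
      rw [harg, ih (s + 1) d yp (fun y hy => hall y (List.mem_cons_of_mem _ hy)) (by push_cast; omega)]
      by_cases hlen : cw.toNat ≤ s + 1 + 1 + t'.length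
      · rw [if_pos hlen, if_pos (by simp only [List.length_cons]; omega)]
        have : cw.toNat - s - 2 = (cw.toNat - (s + 1) - 2) + 1 := by omega
        rw [this, List.getElem?_cons_succ]
      · rw [if_neg hlen, if_neg (by simp only [List.length_cons]; omega)]
        congr 1
        simp only [List.length_cons]
        push_cast
        ring

-- the streak scan over the valid list equals run-grouping + indexing
lemma pvVLoop_eq_findRun (cw : Int) :
    ∀ (n : Nat) (vs : List (Int × String)), vs.length ≤ n →
    pvVLoop cw vs none 0 = pvFindRun (max cw 1).toNat (pvRuns vs) := by
  intro n
  induction n with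
  | zero =>
    intro vs h
    have hvs : vs = [] := List.eq_nil_of_length_eq_zero (Nat.le_zero.mp h)
    subst hvs
    simp [pvVLoop, pvRuns, pvFindRun]
  | succ n ih =>
    intro vs h
    match vs with
    | [] => simp [pvVLoop, pvRuns, pvFindRun]
    | x :: xs =>
      obtain ⟨xi, xp⟩ := x
      rw [pvRuns]
      have hbeta : (fun (y : Int × String) => y.2 == ((xi, xp) : Int × String).2)
          = (fun (y : Int × String) => y.2 == xp) := rfl
      rw [hbeta]
      rw [show pvVLoop cw ((xi, xp) :: xs) none 0
            = if cw ≤ 1 then some (xi, xp) else pvVLoop cw xs (some xp) 1 from by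
          simp [pvVLoop]]
      by_cases h1 : cw ≤ 1
      · rw [max_eq_right h1, if_pos h1]
        simp [pvFindRun]
      · have hcw : 2 ≤ cw := by omega
        rw [max_eq_left (by omega : (1 : Int) ≤ cw), if_neg h1]
        have hxs : xs.takeWhile (fun y => y.2 == xp) ++ xs.dropWhile (fun y => y.2 == xp) = xs :=
          List.takeWhile_append_dropWhile
        have hall : ∀ y ∈ xs.takeWhile (fun (y : Int × String) => y.2 == xp), y.2 = xp := by
          intro y hy
          have := List.mem_takeWhile_imp hy
          simpa using this
        rw [show pvVLoop cw xs (some xp) 1 = pvVLoop cw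
              (xs.takeWhile (fun y => y.2 == xp) ++ xs.dropWhile (fun y => y.2 == xp))
              (some xp) (((0 : Nat) : Int) + 1) by rw [hxs]; norm_num]
        rw [pvVLoop_run cw hcw _ 0 _ xp hall (by omega)]
        simp only [pvFindRun, List.length_cons]
        by_cases hlen : cw.toNat ≤ 0 + 1 + (xs.takeWhile (fun (y : Int × String) => y.2 == xp)).length
        · rw [if_pos hlen, if_pos (by omega)]
          have hidx : cw.toNat - 1 = (cw.toNat - 0 - 2) + 1 := by omega
          rw [hidx, List.getElem?_cons_succ]
        · rw [if_neg hlen, if_neg (by omega)]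
          have h2 : xs.length ≤ n := by simpa using Nat.succ_le_succ_iff.mp h
          cases hd : xs.dropWhile (fun (y : Int × String) => y.2 == xp) with
          | nil => simp [pvVLoop, pvRuns, pvFindRun]
          | cons q ds =>
            have hq : (q.2 == xp) = false := by
              have := List.head?_dropWhile_not (fun (y : Int × String) => y.2 == xp) xs
              rw [hd] at this
              simpa using this
            rw [pvVLoop_reset cw hcw q ds xp hq, ← hd]
            have hih := ih (xs.dropWhile (fun y => y.2 == xp))
              (le_trans (List.length_dropWhile_le _ _) h2)
            rw [max_eq_left (by omega : (1 : Int) ≤ cw)] at hih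
            exact hih

-- ===== VERDICT (by name: the statement is the Claim_ definition above) =====
theorem simulate_unified_heuristic_spec : Claim_equal_simulate_unified_heuristic := by
  intro predictions cooldown_window _
  unfold Spec_simulate_unified_heuristic simulate_unified_heuristic simulate_unified_heuristic_alt
  by_cases hp : predictions = []
  · subst hp
    simp [pvRuns, pvFindRun, PySem.List.enumerate]
  · rw [if_neg hp, pvALoop_eq_vloop,
      pvVLoop_eq_findRun cooldown_window
        ((PySem.List.enumerate predictions 0).filterMap pvValidEntry).length _ le_rfl]
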